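-- pv_equiv track=rewrite | github.com/omarkhaled-auto/agent-team-v18 | src/agent_team_v15/quality_checks.py | _split_params_respecting_generics
-- ===== SOURCE A (Python) =====
-- def _split_params_respecting_generics(params_str: str) -> list[str]:
--     """Split parameters by comma while respecting angle-bracket nesting.
--
--     e.g. ``'a: Map<string, number>, b: string'``
--     -> ``['a: Map<string, number>', 'b: string']``
--     """
--     parts: list[str] = []
--     depth = 0
--     current: list[str] = []
--     for ch in params_str:
--         if ch == "<":
--             depth += 1
--             current.append(ch)
--         elif ch == ">":
--             depth = max(0, depth - 1)
--             current.append(ch)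
--         elif ch == "," and depth == 0:
--             parts.append("".join(current))
--             current = []
--         else:
--             current.append(ch)
--     if current:
--         parts.append("".join(current))
--     return parts
-- ===== SOURCE B (Python) =====
-- def _find_split(s):
--     """Return (text before first top-level comma, text after it), or None."""
--     depth = 0
--     for i, ch in enumerate(s):
--         if ch == "<":
--             depth += 1
--         elif ch == ">":
--             depth = max(0, depth - 1)
--         elif ch == "," and depth == 0:
--             return s[:i], s[i + 1:]
--     return None
--
--
-- def _split_params_respecting_generics(params_str: str) -> list[str]:
--     parts = []
--     s = params_str
--     while True:
--         res = _find_split(s)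
--         if res is None:
--             if s:
--                 parts.append(s)
--             return parts
--         head, s = res
--         parts.append(head)
-- ===== Notes on version B (the rewrite author's own statement) =====
-- stated objective: alternative
-- what changed: Instead of one fold that copies characters into a growing current-segment buffer, B repeatedly finds the first top-level comma (a separate searcher) and cuts the string there, so no per-character accumulator is maintained and the trailing-empty rule falls out of the terminal case.
import Mathlib
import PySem

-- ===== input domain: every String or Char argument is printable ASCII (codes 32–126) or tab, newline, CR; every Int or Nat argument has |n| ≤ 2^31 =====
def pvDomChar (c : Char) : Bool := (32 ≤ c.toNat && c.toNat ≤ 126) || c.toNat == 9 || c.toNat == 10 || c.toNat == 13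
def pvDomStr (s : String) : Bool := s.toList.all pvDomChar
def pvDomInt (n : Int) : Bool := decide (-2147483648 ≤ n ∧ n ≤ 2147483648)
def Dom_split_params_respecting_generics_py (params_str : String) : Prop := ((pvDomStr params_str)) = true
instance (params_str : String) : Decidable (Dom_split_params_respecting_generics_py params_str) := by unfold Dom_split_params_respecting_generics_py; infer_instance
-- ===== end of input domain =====

-- B replaces A's single fold with a character buffer by repeated find-first-top-level-comma-and-cut; same values, alternative decomposition.


-- ===== PORT A =====
-- the for-loop of A: state (parts, depth, current); after the loop, flush a nonempty current
def pvLoopA (parts : List String) (depth : Nat) (current : List Char) : List Char → List String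
  | [] => if current = [] then parts else parts ++ [String.mk current]
  | c :: cs =>
    if c = '<' then pvLoopA parts (depth + 1) (current ++ [c]) cs
    else if c = '>' then pvLoopA parts (depth - 1) (current ++ [c]) cs
    else if c = ',' ∧ depth = 0 then pvLoopA (parts ++ [String.mk current]) depth [] cs
    else pvLoopA parts depth (current ++ [c]) cs

def split_params_respecting_generics_py (params_str : String) : List String :=
  pvLoopA [] 0 [] params_str.toList

-- ===== PORT B =====
-- Source B's _find_split: (chars before the first top-level comma, chars after it), or none
def pvFindSplit (depth : Nat) : List Char → Option (List Char × List Char)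
  | [] => none
  | c :: cs =>
    if c = '<' then (pvFindSplit (depth + 1) cs).map (fun p => (c :: p.1, p.2))
    else if c = '>' then (pvFindSplit (depth - 1) cs).map (fun p => (c :: p.1, p.2))
    else if c = ',' ∧ depth = 0 then some ([], cs)
    else (pvFindSplit depth cs).map (fun p => (c :: p.1, p.2))

theorem pvFindSplit_lt (depth : Nat) (l : List Char) (a b : List Char)
    (h : pvFindSplit depth l = some (a, b)) : b.length < l.length := by
  induction l generalizing depth a b with
  | nil => simp [pvFindSplit] at h
  | cons c cs ih =>
    simp only [pvFindSplit] at h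
    split_ifs at h with h1 h2 h3
    · rcases Option.map_eq_some_iff.mp h with ⟨p, hp, he⟩
      cases he; exact Nat.lt_succ_of_lt (ih _ _ _ (by rw [hp]))
    · rcases Option.map_eq_some_iff.mp h with ⟨p, hp, he⟩
      cases he; exact Nat.lt_succ_of_lt (ih _ _ _ (by rw [hp]))
    · cases h; simp
    · rcases Option.map_eq_some_iff.mp h with ⟨p, hp, he⟩
      cases he; exact Nat.lt_succ_of_lt (ih _ _ _ (by rw [hp]))

-- Source B's while-loop: cut at the first top-level comma until none remains
def pvLoopB (parts : List String) (s : List Char) : List String :=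
  match h : pvFindSplit 0 s with
  | none => if s = [] then parts else parts ++ [String.mk s]
  | some (head, rest) => pvLoopB (parts ++ [String.mk head]) rest
termination_by s.length
decreasing_by exact pvFindSplit_lt _ _ _ _ h

def split_params_respecting_generics_py_alt (params_str : String) : List String :=
  pvLoopB [] params_str.toList

-- ===== PRECONDITION & SPEC =====
def Spec_split_params_respecting_generics_py (params_str : String) (out : List String) : Prop := out = split_params_respecting_generics_py_alt params_str
instance (params_str : String) (out : List String) : Decidable (Spec_split_params_respecting_generics_py params_str out) := by unfold Spec_split_params_respecting_generics_py; infer_instance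

-- ===== CLAIM (what is proved, stated in full; the proofs are below) =====
def Claim_equal_split_params_respecting_generics_py : Prop := ∀ (params_str : String), Dom_split_params_respecting_generics_py params_str → Spec_split_params_respecting_generics_py params_str (split_params_respecting_generics_py params_str)

-- ===== LEMMAS AND PROOFS =====

theorem pvLoopB_append (s : List Char) (parts : List String) :
    pvLoopB parts s = parts ++ pvLoopB [] s := by
  rw [pvLoopB]; conv_rhs => rw [pvLoopB]
  cases h : pvFindSplit 0 s with
  | none => split_ifs <;> simp
  | some p =>
    obtain ⟨head, rest⟩ := p
    simp only []
    rw [pvLoopB_append rest (parts ++ [String.mk head]),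
        pvLoopB_append rest ([] ++ [String.mk head])]
    simp
termination_by s.length
decreasing_by all_goals exact pvFindSplit_lt _ _ _ _ h

theorem pvLoopA_eq (l : List Char) :
    ∀ (parts : List String) (depth : Nat) (current : List Char),
    pvLoopA parts depth current l =
      match pvFindSplit depth l with
      | some (a, b) => parts ++ [String.mk (current ++ a)] ++ pvLoopB [] b
      | none => if current ++ l = [] then parts else parts ++ [String.mk (current ++ l)] := by
  induction l with
  | nil =>
    intro parts depth current
    simp [pvLoopA, pvFindSplit]
  | cons c cs ih =>
    intro parts depth current
    rw [pvLoopA]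
    simp only [pvFindSplit]
    by_cases h1 : c = '<'
    · rw [if_pos h1, if_pos h1, ih]
      cases h : pvFindSplit (depth + 1) cs with
      | none => simp
      | some p => obtain ⟨a, b⟩ := p; simp
    · rw [if_neg h1, if_neg h1]
      by_cases h2 : c = '>'
      · rw [if_pos h2, if_pos h2, ih]
        cases h : pvFindSplit (depth - 1) cs with
        | none => simp
        | some p => obtain ⟨a, b⟩ := p; simp
      · rw [if_neg h2, if_neg h2]
        by_cases h3 : c = ',' ∧ depth = 0
        · rw [if_pos h3, if_pos h3, ih]
          have hB : pvLoopB ([] : List String) cs =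
              match pvFindSplit 0 cs with
              | none => if cs = [] then ([] : List String) else [String.mk cs]
              | some (head, rest) => String.mk head :: pvLoopB [] rest := by
            rw [pvLoopB]
            cases h : pvFindSplit 0 cs with
            | none => simp
            | some p =>
              obtain ⟨head, rest⟩ := p
              simp only []
              rw [pvLoopB_append rest ([] ++ [String.mk head])]
              simp
          obtain ⟨-, h0⟩ := h3
          subst h0
          cases h : pvFindSplit 0 cs with
          | none =>
            simp only [h] at hB ⊢
            rw [hB]
            by_cases hc : cs = [] <;> simp [hc]
          | some p =>
            obtain ⟨a, b⟩ := p
            simp only [h] at hB ⊢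
            rw [hB]
            simp
        · rw [if_neg h3, if_neg h3, ih]
          cases h : pvFindSplit depth cs with
          | none => simp
          | some p => obtain ⟨a, b⟩ := p; simp

-- ===== VERDICT (by name: the statement is the Claim_ definition above) =====
theorem split_params_respecting_generics_py_spec : Claim_equal_split_params_respecting_generics_py := by
  intro s _
  show split_params_respecting_generics_py s = split_params_respecting_generics_py_alt s
  unfold split_params_respecting_generics_py split_params_respecting_generics_py_alt
  rw [pvLoopA_eq, pvLoopB]
  cases h : pvFindSplit 0 s.toList with
  | none => simp
  | some p =>
    obtain ⟨a, b⟩ := p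
    simp only []
    rw [pvLoopB_append b ([] ++ [String.mk a])]
    simp
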